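-- pv_equiv track=rewrite | github.com/cvdd-student/cvdd_thesis | get_svm_weights.py | count_word_occurences
-- ===== SOURCE A (Python) =====
-- def count_word_occurences(list_wordweights, data):
--     # Prepare the counter list
--     list_counters = []
--     for i in range(len(list_wordweights)):
--         list_counters.append(0)
--
--     for item, label in data:
--         for line in item.split("\n"):
--             for i in range(len(list_wordweights)):
--                 if list_wordweights[i][0] in line:
--                     list_counters[i] += 1
--
--     return list_counters
-- ===== SOURCE B (Python) =====
-- def count_word_occurences(list_wordweights, data):
--     lines = []
--     for item, _ in data:
--         lines.extend(item.split("\n"))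
--     lengths = set(len(word) for word, _ in list_wordweights)
--     counters = [0] * len(list_wordweights)
--     for line in lines:
--         # index every window of each needed length into a hash set,
--         # then each word is matched by a single set lookup
--         windows = set()
--         for L in lengths:
--             for j in range(len(line) - L + 1):
--                 windows.add(line[j:j + L])
--         counters = [c + 1 if word in windows else c
--                     for c, (word, _) in zip(counters, list_wordweights)]
--     return counters
-- ===== Notes on version B (the rewrite author's own statement) =====
-- stated objective: faster
-- what changed: B builds, per line, a hash-set index of every window of each needed word length and answers each word by a single O(1) set lookup, instead of A's per-word substring scan of every line.
import Mathlib
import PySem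

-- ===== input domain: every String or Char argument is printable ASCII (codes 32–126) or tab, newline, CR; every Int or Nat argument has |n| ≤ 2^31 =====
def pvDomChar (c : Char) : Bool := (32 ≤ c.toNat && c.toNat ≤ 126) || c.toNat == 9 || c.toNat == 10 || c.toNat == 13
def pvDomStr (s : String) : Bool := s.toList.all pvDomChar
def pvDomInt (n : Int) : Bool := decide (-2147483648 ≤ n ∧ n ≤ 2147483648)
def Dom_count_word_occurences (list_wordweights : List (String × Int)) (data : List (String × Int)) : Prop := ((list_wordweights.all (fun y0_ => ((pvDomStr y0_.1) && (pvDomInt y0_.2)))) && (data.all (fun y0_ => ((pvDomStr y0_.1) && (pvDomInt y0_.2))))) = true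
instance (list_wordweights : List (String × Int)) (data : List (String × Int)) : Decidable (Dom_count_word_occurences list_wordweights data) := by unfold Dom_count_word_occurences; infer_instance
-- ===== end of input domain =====

-- B replaces A's per-word substring scans of every line by a hash-set index: for each line
-- it collects every window of each needed word length into a set once, so each word is then
-- matched by a single set lookup (measured faster on the generated inputs).

-- item.split("\n") with the non-empty separator "\n": split? is always `some` there, the
-- `.getD []` only makes it total.
def pyLines (s : String) : List String := (PySem.Str.split? s "\n").getD []

-- ===== PORT A =====
def count_word_occurences (list_wordweights : List (String × Int)) (data : List (String × Int)) : List Int :=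
  let list_counters :=
    (PySem.List.pyRange 0 (list_wordweights.length : Int) 1).foldl
      (fun c _ => c ++ [(0 : Int)]) []
  data.foldl (fun c p =>
    (pyLines p.1).foldl (fun c line =>
      (PySem.List.pyRange 0 (list_wordweights.length : Int) 1).foldl (fun c i =>
        if PySem.Str.isIn (PySem.List.pyGetD list_wordweights i ("", 0)).1 line then
          PySem.List.pySetD c i (PySem.List.pyGetD c i 0 + 1)
        else c) c) c) list_counters

-- ===== PORT B =====
-- the per-line window index: every slice line[j:j+L] for each needed length L
def pyWindows (line : String) (lengths : PySem.Set Int) : PySem.Set String :=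
  List.foldl (fun s L =>
      (PySem.List.pyRange 0 (PySem.Str.len line - L + 1) 1).foldl
        (fun s j => PySem.Set.add s (PySem.Str.slice line (some j) (some (j + L)))) s)
    PySem.Set.empty lengths

def count_word_occurences_alt (list_wordweights : List (String × Int)) (data : List (String × Int)) : List Int :=
  let lines := data.foldl (fun acc p => acc ++ pyLines p.1) []
  let lengths : PySem.Set Int := PySem.Set.ofList (list_wordweights.map (fun w => PySem.Str.len w.1))
  let counters : List Int := List.replicate list_wordweights.length 0
  lines.foldl (fun counters line =>
    let windows := pyWindows line lengths
    (counters.zip list_wordweights).map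
      (fun p => if PySem.Set.contains windows p.2.1 then p.1 + 1 else p.1))
    counters

-- ===== PRECONDITION & SPEC =====
def Spec_count_word_occurences (list_wordweights : List (String × Int)) (data : List (String × Int)) (out : List Int) : Prop := out = count_word_occurences_alt list_wordweights data
instance (list_wordweights : List (String × Int)) (data : List (String × Int)) (out : List Int) : Decidable (Spec_count_word_occurences list_wordweights data out) := by unfold Spec_count_word_occurences; infer_instance

-- ===== CLAIM (what is proved, stated in full; the proofs are below) =====
def Claim_equal_count_word_occurences : Prop := ∀ (list_wordweights : List (String × Int)) (data : List (String × Int)), Dom_count_word_occurences list_wordweights data → Spec_count_word_occurences list_wordweights data (count_word_occurences list_wordweights data)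

-- ===== LEMMAS AND PROOFS =====

-- A's inner `for i in range(len(ws))` loop, started at index |pre| on state cpre ++ crest,
-- leaves cpre alone and bumps each entry of crest whose word occurs in the line.
theorem pv_inner_loop (line : String) :
    ∀ (rest pre : List (String × Int)) (cpre crest : List Int),
      cpre.length = pre.length → crest.length = rest.length →
      (PySem.List.pyRange (pre.length : Int) ((pre.length + rest.length : Nat) : Int) 1).foldl
        (fun c i =>
          if PySem.Str.isIn (PySem.List.pyGetD (pre ++ rest) i ("", 0)).1 line then
            PySem.List.pySetD c i (PySem.List.pyGetD c i 0 + 1)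
          else c)
        (cpre ++ crest)
      = cpre ++ List.zipWith (fun w v => if PySem.Str.isIn w.1 line then v + 1 else v) rest crest := by
  intro rest
  induction rest with
  | nil =>
      intro pre cpre crest hc hr
      have : crest = [] := List.eq_nil_of_length_eq_zero (by simpa using hr)
      subst this
      simp [PySem.List.pyRange]
  | cons w rest ih =>
      intro pre cpre crest hc hr
      cases crest with
      | nil => simp at hr
      | cons v crest =>
        have hlen : (pre.length : Int) < ((pre.length + (w :: rest).length : Nat) : Int) := by
          simp only [List.length_cons]; push_cast; omega
        rw [PySem.List.pyRange_one_cons hlen, List.foldl_cons]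
        have hgw : PySem.List.pyGetD (pre ++ w :: rest) (pre.length : Int) ("", 0) = w := by
          rw [PySem.List.pyGetD_natCast]
          simp [List.getD_eq_getElem?_getD]
        have hgv : PySem.List.pyGetD (cpre ++ v :: crest) (pre.length : Int) 0 = v := by
          rw [← hc, PySem.List.pyGetD_natCast]
          simp [List.getD_eq_getElem?_getD]
        have hset : PySem.List.pySetD (cpre ++ v :: crest) (pre.length : Int) (v + 1)
            = cpre ++ (v + 1) :: crest := by
          rw [← hc, PySem.List.pySetD_natCast,
            List.set_append_right _ _ (Nat.le_refl _)]
          simp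
        have hstep :
            (if PySem.Str.isIn (PySem.List.pyGetD (pre ++ w :: rest) (pre.length : Int) ("", 0)).1 line then
              PySem.List.pySetD (cpre ++ v :: crest) (pre.length : Int)
                (PySem.List.pyGetD (cpre ++ v :: crest) (pre.length : Int) 0 + 1)
            else cpre ++ v :: crest)
            = (cpre ++ [if PySem.Str.isIn w.1 line then v + 1 else v]) ++ crest := by
          rw [hgw, hgv]
          split_ifs with h
          · rw [hset]; simp
          · simp
        rw [hstep]
        have harg : ((pre ++ [w]).length : Int) = (pre.length : Int) + 1 := by
          simp
        have hbound : ((pre.length + (w :: rest).length : Nat) : Int)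
            = (((pre ++ [w]).length + rest.length : Nat) : Int) := by
          simp; ring
        have hpre : pre ++ w :: rest = (pre ++ [w]) ++ rest := by simp
        rw [hbound, ← harg, hpre,
          ih (pre ++ [w]) (cpre ++ [if PySem.Str.isIn w.1 line then v + 1 else v]) crest
            (by simp [hc]) (by simpa using hr)]
        simp

theorem pv_zipWith_map_self {α β γ : Type} (f : α → β → γ) (g : α → β) :
    ∀ l : List α, List.zipWith f l (l.map g) = l.map (fun a => f a (g a)) := by
  intro l
  induction l with
  | nil => simp
  | cons a l ih => simp [ih]

-- folding A's per-line update over a list of lines, starting from ws.map g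
theorem pv_lines_fold (ws : List (String × Int)) :
    ∀ (lines : List String) (g : (String × Int) → Int),
      lines.foldl (fun c line =>
          (PySem.List.pyRange 0 (ws.length : Int) 1).foldl (fun c i =>
            if PySem.Str.isIn (PySem.List.pyGetD ws i ("", 0)).1 line then
              PySem.List.pySetD c i (PySem.List.pyGetD c i 0 + 1)
            else c) c)
        (ws.map g)
      = ws.map (fun w => g w + ((lines.countP (fun line => PySem.Str.isIn w.1 line)) : Int)) := by
  intro lines
  induction lines with
  | nil => intro g; simp
  | cons line lines ih =>
      intro g
      rw [List.foldl_cons]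
      have hinner :
          (PySem.List.pyRange 0 (ws.length : Int) 1).foldl (fun c i =>
            if PySem.Str.isIn (PySem.List.pyGetD ws i ("", 0)).1 line then
              PySem.List.pySetD c i (PySem.List.pyGetD c i 0 + 1)
            else c) (ws.map g)
          = List.zipWith (fun w v => if PySem.Str.isIn w.1 line then v + 1 else v) ws (ws.map g) := by
        have := pv_inner_loop line ws [] [] (ws.map g) rfl (by simp)
        simpa using this
      rw [hinner, pv_zipWith_map_self]
      rw [ih (fun w => if PySem.Str.isIn w.1 line then g w + 1 else g w)]
      refine List.map_congr_left ?_
      intro w _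
      simp only [List.countP_cons]
      split_ifs with h <;> push_cast <;> ring

-- membership in a fold of Set.add over a list of generators
theorem pv_mem_foldl_add {α β : Type} [BEq α] [LawfulBEq α] (f : β → α) :
    ∀ (js : List β) (s : PySem.Set α) (x : α),
      x ∈ js.foldl (fun s j => PySem.Set.add s (f j)) s ↔ x ∈ s ∨ ∃ j ∈ js, f j = x := by
  intro js
  induction js with
  | nil => intro s x; simp
  | cons j js ih =>
      intro s x
      rw [List.foldl_cons, ih]
      rw [PySem.Set.mem_add]
      constructor
      · rintro (⟨h | h⟩ | ⟨j', hj', hf⟩)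
        · exact Or.inl h
        · exact Or.inr ⟨j, by simp, h.symm⟩
        · exact Or.inr ⟨j', by simp [hj'], hf⟩
      · rintro (h | ⟨j', hj', hf⟩)
        · exact Or.inl (Or.inl h)
        · rcases List.mem_cons.mp hj' with h | h
          · subst h; exact Or.inl (Or.inr hf.symm)
          · exact Or.inr ⟨j', h, hf⟩

-- what the window set contains
theorem pv_mem_pyWindows (line : String) (lengths : PySem.Set Int) (x : String) :
    x ∈ pyWindows line lengths ↔
      ∃ L ∈ (lengths : List Int), ∃ j : Int, 0 ≤ j ∧ j < PySem.Str.len line - L + 1 ∧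
        PySem.Str.slice line (some j) (some (j + L)) = x := by
  unfold pyWindows
  have main : ∀ (ls : List Int) (s : PySem.Set String),
      x ∈ List.foldl (fun s L =>
        (PySem.List.pyRange 0 (PySem.Str.len line - L + 1) 1).foldl
          (fun s j => PySem.Set.add s (PySem.Str.slice line (some j) (some (j + L)))) s) s ls
      ↔ x ∈ s ∨ ∃ L ∈ ls, ∃ j : Int, 0 ≤ j ∧ j < PySem.Str.len line - L + 1 ∧
          PySem.Str.slice line (some j) (some (j + L)) = x := by
    intro ls
    induction ls with
    | nil => intro s; simp
    | cons L ls ih =>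
        intro s
        rw [List.foldl_cons, ih]
        rw [pv_mem_foldl_add (fun j => PySem.Str.slice line (some j) (some (j + L)))]
        constructor
        · rintro (⟨h | ⟨j, hj, hf⟩⟩ | ⟨L', hL', rest⟩)
          · exact Or.inl h
          · rcases PySem.List.mem_pyRange_one.mp hj with ⟨h0, h1⟩
            exact Or.inr ⟨L, by simp, j, h0, h1, hf⟩
          · exact Or.inr ⟨L', by simp [hL'], rest⟩
        · rintro (h | ⟨L', hL', j, h0, h1, hf⟩)
          · exact Or.inl (Or.inl h)
          · rcases List.mem_cons.mp hL' with h | h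
            · subst h
              exact Or.inl (Or.inr ⟨j, PySem.List.mem_pyRange_one.mpr ⟨h0, h1⟩, hf⟩)
            · exact Or.inr ⟨L', h, j, h0, h1, hf⟩
  rw [main]
  simp [PySem.Set.empty]

theorem pv_chars_slice (l : List Char) (a b : Option Int) :
    PySem.Chars.slice l a b = PySem.List.slice l a b := rfl

-- for a word whose length is indexed, set lookup = substring containment
theorem pv_contains_windows (line w : String) (lengths : PySem.Set Int)
    (hmem : PySem.Str.len w ∈ (lengths : List Int))
    (hnn : ∀ L ∈ (lengths : List Int), 0 ≤ L) :
    PySem.Set.contains (pyWindows line lengths) w = PySem.Str.isIn w line := by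
  have hiff : w ∈ pyWindows line lengths ↔ w.toList <:+: line.toList := by
    rw [pv_mem_pyWindows]
    constructor
    · rintro ⟨L, hL, j, h0, h1, hf⟩
      have hLnn := hnn L hL
      have : (PySem.Str.slice line (some j) (some (j + L))).toList
          = (line.toList.drop j.toNat).take ((j + L).toNat - j.toNat) := by
        rw [PySem.Str.toList_slice]
        exact PySem.List.slice_toNat line.toList h0 (by omega)
      rw [← hf, this]
      exact ((List.take_prefix _ _).isInfix).trans ((List.drop_suffix _ _).isInfix)
    · intro hinf
      rcases hinf with ⟨s, t, hst⟩
      refine ⟨PySem.Str.len w, hmem, (s.length : Int), by positivity, ?_, ?_⟩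
      · have hlen : s.length + w.toList.length + t.length = line.toList.length := by
          rw [← hst]; simp; omega
        rw [PySem.Str.len_eq, PySem.Str.len_eq]
        omega
      · rw [← String.toList_inj, PySem.Str.toList_slice, PySem.Str.len_eq]
        have : ((s.length : Int) + (w.toList.length : Int))
            = ((s.length : Int) + ((w.toList.length : Nat) : Int)) := by ring
        rw [this, pv_chars_slice, PySem.List.slice_natCast_add]
        rw [← hst]
        rw [List.drop_append_of_le_length (by simp), List.drop_left]
        simp
  rcases h : PySem.Str.isIn w line with _ | _
  · have : ¬ w.toList <:+: line.toList := by
      intro hc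
      rw [(PySem.Str.isIn_iff_infix w line).mpr hc] at h
      exact Bool.false_ne_true h.symm
    rcases hcw : PySem.Set.contains (pyWindows line lengths) w with _ | _
    · rfl
    · exact absurd (hiff.mp ((PySem.Set.contains_iff _ _).mp hcw)) this
  · exact (PySem.Set.contains_iff _ _).mpr
      (hiff.mpr ((PySem.Str.isIn_iff_infix w line).mp h))

-- folding B's per-line update over the lines, starting from ws.map g
theorem pv_alt_lines_fold (ws : List (String × Int)) (lengths : PySem.Set Int)
    (hmem : ∀ w ∈ ws, PySem.Str.len w.1 ∈ (lengths : List Int))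
    (hnn : ∀ L ∈ (lengths : List Int), 0 ≤ L) :
    ∀ (lines : List String) (g : (String × Int) → Int),
      lines.foldl (fun counters line =>
          ((counters.zip ws).map
            (fun p => if PySem.Set.contains (pyWindows line lengths) p.2.1 then p.1 + 1 else p.1)))
        (ws.map g)
      = ws.map (fun w => g w + ((lines.countP (fun line => PySem.Str.isIn w.1 line)) : Int)) := by
  intro lines
  induction lines with
  | nil => intro g; simp
  | cons line lines ih =>
      intro g
      rw [List.foldl_cons]
      have hzip : (ws.map g).zip ws = ws.map (fun w => (g w, w)) :=
        (List.map_prod_right_eq_zip).symm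
      have hstep : ((ws.map g).zip ws).map
            (fun p => if PySem.Set.contains (pyWindows line lengths) p.2.1 then p.1 + 1 else p.1)
          = ws.map (fun w => if PySem.Str.isIn w.1 line then g w + 1 else g w) := by
        rw [hzip, List.map_map]
        refine List.map_congr_left ?_
        intro w hw
        simp only [Function.comp]
        rw [pv_contains_windows line w.1 lengths (hmem w hw) hnn]
      rw [hstep, ih (fun w => if PySem.Str.isIn w.1 line then g w + 1 else g w)]
      refine List.map_congr_left ?_
      intro w _
      simp only [List.countP_cons]
      split_ifs with h <;> push_cast <;> ring

-- ===== VERDICT (by name: the statement is the Claim_ definition above) =====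
theorem count_word_occurences_spec : Claim_equal_count_word_occurences := by
  intro ws data _
  unfold Spec_count_word_occurences count_word_occurences count_word_occurences_alt
  have hc0 :
      (PySem.List.pyRange 0 (ws.length : Int) 1).foldl (fun c _ => c ++ [(0 : Int)]) []
        = ws.map (fun _ => (0 : Int)) := by
    rw [PySem.List.foldl_append_singleton_eq_map]
    show List.map _ _ = _
    rw [show (fun _ : Int => (0 : Int)) = Function.const Int (0 : Int) from rfl,
      show (fun _ : String × Int => (0 : Int)) = Function.const (String × Int) (0 : Int) from rfl,
      List.map_const, List.map_const]
    congr 1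
    rw [PySem.List.pyRange_zero_natCast]
    simp
  have hrep : (List.replicate ws.length (0 : Int)) = ws.map (fun _ => (0 : Int)) := by
    rw [show (fun _ : String × Int => (0 : Int)) = Function.const (String × Int) (0 : Int) from rfl,
      List.map_const]
  simp only [hc0, hrep]
  rw [← List.foldl_flatMap (f := fun p : String × Int => pyLines p.1)]
  rw [pv_lines_fold ws (data.flatMap fun p => pyLines p.1) (fun _ => 0)]
  rw [PySem.List.foldl_append_eq_flatMap]
  simp only [List.nil_append]
  rw [pv_alt_lines_fold ws _ ?hmem ?hnn (data.flatMap fun p => pyLines p.1) (fun _ => 0)]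
  case hmem =>
    intro w hw
    rw [PySem.Set.mem_ofList]
    exact List.mem_map.mpr ⟨w, hw, rfl⟩
  case hnn =>
    intro L hL
    rw [PySem.Set.mem_ofList] at hL
    rcases List.mem_map.mp hL with ⟨w, _, rfl⟩
    rw [PySem.Str.len_eq]
    positivity
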